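-- pv_equiv track=rewrite | github.com/vrutikpatel227/codefy-agent | app.py | is_code_query
-- ===== SOURCE A (Python) =====
-- def is_code_query(text):
--     keywords = [
--         "code", "error", "python", "java", "fix", "bug",
--         "program", "c++", "html", "css", "javascript",
--         "login", "function", "api", "react", "flask",
--         "sql", "php", "node", "backend", "frontend"
--     ]
--     return any(word in text.lower() for word in keywords)
-- ===== SOURCE B (Python) =====
-- _KW = ("code error python java fix bug program c++ html css javascript "
--        "login function api react flask sql php node backend frontend").split()
--
-- def is_code_query(text):
--     t = text.lower()
--     i = 0
--     while i <= len(t):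
--         for w in _KW:
--             if t.startswith(w, i):
--                 return True
--         i += 1
--     return False
-- ===== Notes on version B (the rewrite author's own statement) =====
-- stated objective: alternative
-- what changed: B keeps the keywords as one whitespace-split string and replaces A's 21 independent substring-membership passes by a single left-to-right suffix scan that checks at each position whether some keyword starts there.
import Mathlib
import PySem

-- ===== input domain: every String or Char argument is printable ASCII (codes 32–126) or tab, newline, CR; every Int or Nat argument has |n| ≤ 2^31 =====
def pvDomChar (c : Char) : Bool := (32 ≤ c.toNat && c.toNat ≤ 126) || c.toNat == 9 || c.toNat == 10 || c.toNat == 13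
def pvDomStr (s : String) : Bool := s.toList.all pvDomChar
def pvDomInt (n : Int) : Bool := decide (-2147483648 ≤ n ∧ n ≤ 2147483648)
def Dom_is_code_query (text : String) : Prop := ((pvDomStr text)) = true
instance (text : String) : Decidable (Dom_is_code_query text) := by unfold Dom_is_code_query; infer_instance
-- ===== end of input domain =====

-- B keeps the keywords as one whitespace-split string and replaces A's 21 independent
-- substring-membership passes by one left-to-right suffix scan (at each position, does
-- some keyword start here?) — alternative decomposition, same exact result.

-- ===== PORT A =====
def kwA : List String :=
  ["code", "error", "python", "java", "fix", "bug",
   "program", "c++", "html", "css", "javascript",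
   "login", "function", "api", "react", "flask",
   "sql", "php", "node", "backend", "frontend"]

def is_code_query (text : String) : Bool :=
  kwA.any (fun word => PySem.Str.isIn word (PySem.Str.lower text))

-- ===== PORT B =====
def kwStrB : String :=
  "code error python java fix bug program c++ html css javascript login function api react flask sql php node backend frontend"

-- the while loop over i = 0 .. len(t): structural recursion over the suffixes of t,
-- at each suffix testing whether some keyword is a prefix (= t.startswith(w, i))
def scanB (kws : List String) : List Char → Bool
  | [] => kws.any (fun w => PySem.Chars.startswith [] w.toList)
  | c :: rest =>
      kws.any (fun w => PySem.Chars.startswith (c :: rest) w.toList) || scanB kws rest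

def is_code_query_alt (text : String) : Bool :=
  scanB (PySem.Str.split₀ kwStrB) (PySem.Str.lower text).toList

-- ===== PRECONDITION & SPEC =====
def Spec_is_code_query (text : String) (out : Bool) : Prop := out = is_code_query_alt text
instance (text : String) (out : Bool) : Decidable (Spec_is_code_query text out) := by unfold Spec_is_code_query; infer_instance

-- ===== CLAIM =====
def Claim_equal_is_code_query : Prop := ∀ (text : String), Dom_is_code_query text → Spec_is_code_query text (is_code_query text)

-- ===== LEMMAS AND PROOFS =====

theorem scanB_iff (kws : List String) (t : List Char) :
    scanB kws t = true ↔ ∃ s, s <:+ t ∧ ∃ w ∈ kws, w.toList <+: s := by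
  induction t with
  | nil =>
      simp only [scanB, List.any_eq_true, PySem.Chars.startswith_iff]
      constructor
      · rintro ⟨w, hw, hp⟩; exact ⟨[], List.suffix_refl _, w, hw, hp⟩
      · rintro ⟨s, hs, w, hw, hp⟩
        rw [List.suffix_nil] at hs; subst hs; exact ⟨w, hw, hp⟩
  | cons c rest ih =>
      simp only [scanB, Bool.or_eq_true, List.any_eq_true, PySem.Chars.startswith_iff, ih]
      constructor
      · rintro (⟨w, hw, hp⟩ | ⟨s, hs, w, hw, hp⟩)
        · exact ⟨c :: rest, List.suffix_refl _, w, hw, hp⟩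
        · exact ⟨s, hs.trans (List.suffix_cons c rest), w, hw, hp⟩
      · rintro ⟨s, hs, w, hw, hp⟩
        rcases List.suffix_cons_iff.mp hs with h | h
        · subst h; exact Or.inl ⟨w, hw, hp⟩
        · exact Or.inr ⟨s, h, w, hw, hp⟩

set_option maxRecDepth 8192 in
set_option maxRecDepth 10000 in
theorem splitB_eq : PySem.Str.split₀ kwStrB = kwA := by
  simp only [PySem.Str.split₀]
  decide

theorem is_code_query_eq_alt (text : String) : is_code_query text = is_code_query_alt text := by
  rw [Bool.eq_iff_iff]
  simp only [is_code_query, is_code_query_alt, splitB_eq, scanB_iff, List.any_eq_true,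
    PySem.Str.isIn_iff_infix, List.infix_iff_prefix_suffix]
  constructor
  · rintro ⟨w, hw, s, hp, hs⟩; exact ⟨s, hs, w, hw, hp⟩
  · rintro ⟨s, hs, w, hw, hp⟩; exact ⟨w, hw, s, hp, hs⟩

-- ===== VERDICT =====
theorem is_code_query_spec : Claim_equal_is_code_query := by
  intro text _
  exact is_code_query_eq_alt text
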